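-- pv_equiv track=rewrite | github.com/Artuur-Oerlemans/adventOfCode2021 | src/day03/solution.py | oxygen_eliminator
-- ===== SOURCE A (Python) =====
-- def oxygen_eliminator(lines, place):
-- 	number1 = 0
-- 	result = list()
-- 	for line in lines:
-- 		if line[place] == '1':
-- 			number1 += 1
--
-- 	for line in lines:
-- 		if number1 >= len(lines) - number1 and line[place] == '1':
-- 			result.append(line)
-- 		elif number1 < len(lines) - number1 and line[place] == '0':
-- 			result.append(line)
-- 	return result
-- ===== SOURCE B (Python) =====
-- def oxygen_eliminator(lines, place):
-- 	ones = []
-- 	zeros = []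
-- 	for line in lines:
-- 		c = line[place]
-- 		if c == '1':
-- 			ones.append(line)
-- 		elif c == '0':
-- 			zeros.append(line)
-- 	if len(ones) >= len(lines) - len(ones):
-- 		return ones
-- 	return zeros
-- ===== Notes on version B (the rewrite author's own statement) =====
-- stated objective: simpler
-- what changed: Replaces the count-then-filter two-pass structure (count '1's, then re-scan testing the majority condition per line) with a single-pass partition into ones/zeros buckets followed by selecting the majority bucket.
import Mathlib
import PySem

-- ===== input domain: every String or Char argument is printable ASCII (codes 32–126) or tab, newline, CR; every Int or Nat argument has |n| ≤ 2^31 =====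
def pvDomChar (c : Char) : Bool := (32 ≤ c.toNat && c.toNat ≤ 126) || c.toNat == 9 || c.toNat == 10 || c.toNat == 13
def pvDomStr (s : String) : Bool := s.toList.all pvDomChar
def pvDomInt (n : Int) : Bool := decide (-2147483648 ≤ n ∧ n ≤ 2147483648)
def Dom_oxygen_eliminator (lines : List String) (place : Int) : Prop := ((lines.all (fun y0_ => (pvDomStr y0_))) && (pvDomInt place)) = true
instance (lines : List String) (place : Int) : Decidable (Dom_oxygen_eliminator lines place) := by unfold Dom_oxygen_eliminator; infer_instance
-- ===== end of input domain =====

-- B replaces A's count-then-filter two passes by one single-pass partition into ones/zeros buckets, then selects the majority bucket (objective: simpler).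


-- ===== PORT A =====
def oxygen_eliminator (lines : List String) (place : Int) : List String :=
  let number1 : Int :=
    lines.foldl (fun n line => if PySem.Str.pyGet? line place = some '1' then n + 1 else n) 0
  lines.foldl
    (fun result line =>
      if number1 ≥ (lines.length : Int) - number1 ∧ PySem.Str.pyGet? line place = some '1' then
        result ++ [line]
      else if number1 < (lines.length : Int) - number1 ∧ PySem.Str.pyGet? line place = some '0' then
        result ++ [line]
      else result)
    []

-- ===== PORT B =====
def oxygen_eliminator_alt (lines : List String) (place : Int) : List String :=
  let buckets :=
    lines.foldl
      (fun (p : List String × List String) line =>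
        if PySem.Str.pyGet? line place = some '1' then (p.1 ++ [line], p.2)
        else if PySem.Str.pyGet? line place = some '0' then (p.1, p.2 ++ [line])
        else p)
      ([], [])
  if (buckets.1.length : Int) ≥ (lines.length : Int) - (buckets.1.length : Int) then buckets.1
  else buckets.2

-- ===== PRECONDITION & SPEC =====
-- Pre_ excludes exactly the inputs where the Python A raises IndexError: some line has no
-- character at index `place` (Python semantics; negative indices count from the end).
def Pre_oxygen_eliminator (lines : List String) (place : Int) : Prop :=
  ∀ line ∈ lines, PySem.Raise.InRange line.toList.length place
instance (lines : List String) (place : Int) : Decidable (Pre_oxygen_eliminator lines place) := by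
  unfold Pre_oxygen_eliminator; infer_instance

def pvWitness_oxygen_eliminator : List String × Int := (["101", "010", "110"], 1)

def Spec_oxygen_eliminator (lines : List String) (place : Int) (out : List String) : Prop := out = oxygen_eliminator_alt lines place
instance (lines : List String) (place : Int) (out : List String) : Decidable (Spec_oxygen_eliminator lines place out) := by unfold Spec_oxygen_eliminator; infer_instance

-- ===== CLAIM (what is proved, stated in full; the proofs are below) =====
def Claim_equal_oxygen_eliminator : Prop := ∀ (lines : List String) (place : Int), Dom_oxygen_eliminator lines place → Pre_oxygen_eliminator lines place → Spec_oxygen_eliminator lines place (oxygen_eliminator lines place)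

-- ===== LEMMAS AND PROOFS =====

-- B's bucket fold (over an opaque character accessor g) is the pair of the two filters.
theorem buckets_eq (g : String → Option Char) (lines : List String) (o z : List String) :
    lines.foldl
      (fun (p : List String × List String) line =>
        if g line = some '1' then (p.1 ++ [line], p.2)
        else if g line = some '0' then (p.1, p.2 ++ [line])
        else p)
      (o, z)
    = (o ++ lines.filter (fun line => decide (g line = some '1')),
       z ++ lines.filter (fun line => decide (g line = some '0'))) := by
  induction lines generalizing o z with
  | nil => simp
  | cons x xs ih =>
    by_cases h1 : g x = some '1'
    · have h0 : ¬ g x = some '0' := by simp [h1]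
      simp [h1, ih]
    · by_cases h0 : g x = some '0'
      · simp [h0, ih]
      · simp [h1, h0, ih]

-- A's count-then-filter equals B's partition-then-select, for an opaque accessor g.
theorem AB_general (g : String → Option Char) (lines : List String) :
    (let number1 : Int :=
       lines.foldl (fun n line => if g line = some '1' then n + 1 else n) 0
     lines.foldl
       (fun result line =>
         if number1 ≥ (lines.length : Int) - number1 ∧ g line = some '1' then result ++ [line]
         else if number1 < (lines.length : Int) - number1 ∧ g line = some '0' then result ++ [line]
         else result)
       [])
    = (let buckets :=
         lines.foldl
           (fun (p : List String × List String) line =>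
             if g line = some '1' then (p.1 ++ [line], p.2)
             else if g line = some '0' then (p.1, p.2 ++ [line])
             else p)
           ([], [])
       if (buckets.1.length : Int) ≥ (lines.length : Int) - (buckets.1.length : Int) then buckets.1
       else buckets.2) := by
  rw [show (lines.foldl (fun n line => if g line = some '1' then n + 1 else n) 0)
        = ((lines.countP (fun line => decide (g line = some '1'))) : Int) by
      simpa using PySem.List.foldl_ite_add_one (fun line => g line = some '1') lines 0,
      buckets_eq g lines [] []]
  simp only [List.nil_append]
  rw [show ((lines.filter (fun line => decide (g line = some '1'))).length : Int)
        = ((lines.countP (fun line => decide (g line = some '1'))) : Int) by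
      rw [List.countP_eq_length_filter]]
  by_cases hmaj : ((lines.countP (fun line => decide (g line = some '1'))) : Int)
      ≥ (lines.length : Int) - ((lines.countP (fun line => decide (g line = some '1'))) : Int)
  · rw [if_pos hmaj,
        PySem.List.foldl_congr_mem lines _
          (fun result line => if g line = some '1' then result ++ [line] else result)
          [] (by
            intro acc x _
            by_cases hx : g x = some '1'
            · rw [if_pos ⟨hmaj, hx⟩]; exact (if_pos hx).symm
            · rw [if_neg (fun h => hx h.2), if_neg (fun h => absurd h.1 (by omega : ¬ _))]
              exact (if_neg hx).symm),
        PySem.List.foldl_append_ite_eq_filter (fun line => g line = some '1') lines []]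
    simp
  · rw [if_neg hmaj,
        PySem.List.foldl_congr_mem lines _
          (fun result line => if g line = some '0' then result ++ [line] else result)
          [] (by
            intro acc x _
            rw [if_neg (fun h => hmaj h.1)]
            by_cases hx : g x = some '0'
            · rw [if_pos ⟨by omega, hx⟩]; exact (if_pos hx).symm
            · rw [if_neg (fun h => hx h.2)]; exact (if_neg hx).symm),
        PySem.List.foldl_append_ite_eq_filter (fun line => g line = some '0') lines []]
    simp

-- ===== VERDICT (by name: the statement is the Claim_ definition above) =====
theorem oxygen_eliminator_spec : Claim_equal_oxygen_eliminator := by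
  intro lines place _ _
  unfold Spec_oxygen_eliminator oxygen_eliminator oxygen_eliminator_alt
  exact AB_general (fun line => PySem.Str.pyGet? line place) lines
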